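-- pv_equiv track=rewrite | github.com/kirilman/stones_size_fragmentaion | ASBEST_VEINS_LABELING/labelutilits/utils/geometry.py | correct_sequence
-- ===== SOURCE A (Python) =====
-- def correct_sequence(p1, p2, p3, p4):
--     p_max_x, p_max_y, p_min_x, p_min_y = [None for i in range(4)]
--     max_x = max_y = -(10**10)
--     min_x = min_y = 10**10
--     for p in (p1, p2, p3, p4):
--         if p[0] > max_x:
--             max_x = p[0]
--             p_max_x = p
--         if p[0] < min_x:
--             min_x = p[0]
--             p_min_x = p
--         if p[1] > max_y:
--             max_y = p[1]
--             p_max_y = p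
--         if p[1] < min_y:
--             min_y = p[1]
--             p_min_y = p
--     return p_min_y, p_max_x, p_max_y, p_min_x
-- ===== SOURCE B (Python) =====
-- def correct_sequence(p1, p2, p3, p4):
--     pts = [p1, p2, p3, p4]
--     by_x = sorted(pts, key=lambda p: p[0])
--     by_x_desc = sorted(pts, key=lambda p: p[0], reverse=True)
--     by_y = sorted(pts, key=lambda p: p[1])
--     by_y_desc = sorted(pts, key=lambda p: p[1], reverse=True)
--     return by_y[0], by_x_desc[0], by_y_desc[0], by_x[0]
-- ===== Notes on version B (the rewrite author's own statement) =====
-- stated objective: alternative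
-- what changed: Replaces A's single fused accumulator scan (sentinels plus four tracked extrema) by four stable sorts of the point list (ascending/descending by x and by y) and taking the head of each; stability reproduces Python's first-extremal tie-breaking.
import Mathlib
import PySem

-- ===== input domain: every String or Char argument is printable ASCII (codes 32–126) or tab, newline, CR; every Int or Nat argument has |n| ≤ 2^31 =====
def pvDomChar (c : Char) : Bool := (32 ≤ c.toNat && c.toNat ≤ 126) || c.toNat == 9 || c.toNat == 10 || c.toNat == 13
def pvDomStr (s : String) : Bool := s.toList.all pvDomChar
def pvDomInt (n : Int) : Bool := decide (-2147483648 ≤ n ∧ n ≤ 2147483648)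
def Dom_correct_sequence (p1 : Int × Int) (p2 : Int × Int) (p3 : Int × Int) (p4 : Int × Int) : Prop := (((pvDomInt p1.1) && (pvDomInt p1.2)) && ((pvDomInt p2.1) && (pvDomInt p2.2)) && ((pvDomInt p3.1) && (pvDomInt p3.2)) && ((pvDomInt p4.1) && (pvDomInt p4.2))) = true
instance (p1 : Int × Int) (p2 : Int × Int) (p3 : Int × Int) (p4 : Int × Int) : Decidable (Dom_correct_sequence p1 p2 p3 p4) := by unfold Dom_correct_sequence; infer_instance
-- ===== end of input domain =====

-- B replaces A's fused accumulator loop (sentinels + four tracked extrema) by four stable sorts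
-- of the point list and taking the head of each (objective: alternative); stable sorting
-- reproduces Python's first-extremal tie-breaking, so the results coincide.


-- ===== PORT A =====
-- One loop body of A: for each of the four extrema, the same strict test updates the numeric
-- bound and the tracked point (Python's single `if` updating both, written as two ifs on the
-- same condition). State = ((p_max_x, p_max_y, p_min_x, p_min_y), (max_x, max_y, min_x, min_y)).
def stepA (s : (Option (Int × Int) × Option (Int × Int) × Option (Int × Int) × Option (Int × Int)) × (Int × Int × Int × Int)) (p : Int × Int) :
    (Option (Int × Int) × Option (Int × Int) × Option (Int × Int) × Option (Int × Int)) × (Int × Int × Int × Int) :=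
  ((if p.1 > s.2.1 then some p else s.1.1,
    if p.2 > s.2.2.1 then some p else s.1.2.1,
    if p.1 < s.2.2.2.1 then some p else s.1.2.2.1,
    if p.2 < s.2.2.2.2 then some p else s.1.2.2.2),
   (if p.1 > s.2.1 then p.1 else s.2.1,
    if p.2 > s.2.2.1 then p.2 else s.2.2.1,
    if p.1 < s.2.2.2.1 then p.1 else s.2.2.2.1,
    if p.2 < s.2.2.2.2 then p.2 else s.2.2.2.2))

-- Port of A: fold of the fused loop body over (p1,p2,p3,p4) from the ±10^10 sentinel state.
-- Inside Dom (|coord| ≤ 2^31) every coordinate beats the sentinels, so every tracker is some _;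
-- where Python would return None components (coordinates beyond the sentinels, outside Dom)
-- .getD (0,0) stands in.
def correct_sequence (p1 : Int × Int) (p2 : Int × Int) (p3 : Int × Int) (p4 : Int × Int) : (Int × Int) × (Int × Int) × (Int × Int) × (Int × Int) :=
  let r := [p1, p2, p3, p4].foldl stepA ((none, none, none, none), (-(10^10), -(10^10), 10^10, 10^10))
  ((r.1.2.2.2).getD (0, 0), (r.1.1).getD (0, 0), (r.1.2.1).getD (0, 0), (r.1.2.2.1).getD (0, 0))

-- ===== PORT B =====
-- Port of B: four stable sorts by a coordinate key (PySem.List.sorted = Python's sorted with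
-- key/reverse) and the [0] element of each (PySem.List.pyGet?); the lists are literally
-- nonempty, so [0] always exists and .getD (0,0) is never reached.
def correct_sequence_alt (p1 : Int × Int) (p2 : Int × Int) (p3 : Int × Int) (p4 : Int × Int) : (Int × Int) × (Int × Int) × (Int × Int) × (Int × Int) :=
  let pts : List (Int × Int) := [p1, p2, p3, p4]
  let by_x := PySem.List.sorted pts (fun p => p.1) false
  let by_x_desc := PySem.List.sorted pts (fun p => p.1) true
  let by_y := PySem.List.sorted pts (fun p => p.2) false
  let by_y_desc := PySem.List.sorted pts (fun p => p.2) true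
  ((PySem.List.pyGet? by_y 0).getD (0, 0),
   (PySem.List.pyGet? by_x_desc 0).getD (0, 0),
   (PySem.List.pyGet? by_y_desc 0).getD (0, 0),
   (PySem.List.pyGet? by_x 0).getD (0, 0))

-- ===== PRECONDITION & SPEC =====
def Spec_correct_sequence (p1 : Int × Int) (p2 : Int × Int) (p3 : Int × Int) (p4 : Int × Int) (out : (Int × Int) × (Int × Int) × (Int × Int) × (Int × Int)) : Prop := out = correct_sequence_alt p1 p2 p3 p4
instance (p1 : Int × Int) (p2 : Int × Int) (p3 : Int × Int) (p4 : Int × Int) (out : (Int × Int) × (Int × Int) × (Int × Int) × (Int × Int)) : Decidable (Spec_correct_sequence p1 p2 p3 p4 out) := by unfold Spec_correct_sequence; infer_instance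

-- ===== CLAIM (what is proved, stated in full; the proofs are below) =====
def Claim_equal_correct_sequence : Prop := ∀ (p1 : Int × Int) (p2 : Int × Int) (p3 : Int × Int) (p4 : Int × Int), Dom_correct_sequence p1 p2 p3 p4 → Spec_correct_sequence p1 p2 p3 p4 (correct_sequence p1 p2 p3 p4)

-- ===== LEMMAS AND PROOFS =====
-- xs[0] is the head of the list.
theorem pyGet?_zero_eq_head? (xs : List (Int × Int)) : PySem.List.pyGet? xs 0 = xs.head? := by
  cases xs <;> simp [PySem.List.pyGet?, PySem.List.pyIdx?]

-- The head of an insertion-sort fold only depends on the running head: it evolves by the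
-- first-wins "best so far" step `if before x m then x else m`.
theorem insert_fold_head (before : (Int × Int) → (Int × Int) → Bool) :
    ∀ (l : List (Int × Int)) (h : Int × Int) (t : List (Int × Int)),
    (List.foldl (fun acc x => PySem.List.insertBy before x acc) (h :: t) l).head?
      = some (List.foldl (fun m x => if before x m then x else m) h l) := by
  intro l
  induction l with
  | nil => intro h t; rfl
  | cons x l ih =>
    intro h t
    by_cases hb : before x h <;>
      simp only [List.foldl_cons, PySem.List.insertBy, hb, if_pos, if_neg,
        Bool.false_eq_true, not_false_iff] <;>
      exact ih _ _

-- Python's min(..., key) as the same first-wins fold from the head.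
theorem min?_cons_eq_fold (key : (Int × Int) → Int) (q : Int × Int) (l : List (Int × Int)) :
    PySem.List.min? (q :: l) key
      = some (List.foldl (fun m x => if decide (key x < key m) then x else m) q l) := by
  simp only [PySem.List.min?, List.foldl_cons]
  induction l generalizing q with
  | nil => rfl
  | cons x l ih => by_cases h : key x < key q <;> simp [h, ih]

-- Python's max(..., key) as the same first-wins fold from the head.
theorem max?_cons_eq_fold (key : (Int × Int) → Int) (q : Int × Int) (l : List (Int × Int)) :
    PySem.List.max? (q :: l) key
      = some (List.foldl (fun m x => if decide (key m < key x) then x else m) q l) := by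
  simp only [PySem.List.max?, List.foldl_cons]
  induction l generalizing q with
  | nil => rfl
  | cons x l ih => by_cases h : key q < key x <;> simp [h, ih]

-- Head of a stable ascending sort = Python's min with the same key (first minimal element).
theorem sorted_head_min (key : (Int × Int) → Int) (q : Int × Int) (l : List (Int × Int)) :
    (PySem.List.sorted (q :: l) key false).head? = PySem.List.min? (q :: l) key := by
  rw [min?_cons_eq_fold]
  simp only [PySem.List.sorted, List.foldl_cons]
  exact insert_fold_head _ l q []

-- Head of a stable descending sort = Python's max with the same key (first maximal element).
theorem sorted_head_max (key : (Int × Int) → Int) (q : Int × Int) (l : List (Int × Int)) :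
    (PySem.List.sorted (q :: l) key true).head? = PySem.List.max? (q :: l) key := by
  rw [max?_cons_eq_fold]
  simp only [PySem.List.sorted, List.foldl_cons]
  exact insert_fold_head _ l q []

-- Stepping lemmas: max/min(..., key=...) over q :: x :: t keeps the first-extremal survivor.
theorem max?_cons_cons (key : (Int × Int) → Int) (q x : Int × Int) (t : List (Int × Int)) :
    PySem.List.max? (q :: x :: t) key = PySem.List.max? ((if key q < key x then x else q) :: t) key := by
  by_cases h : key q < key x <;> simp [PySem.List.max?, h]

theorem min?_cons_cons (key : (Int × Int) → Int) (q x : Int × Int) (t : List (Int × Int)) :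
    PySem.List.min? (q :: x :: t) key = PySem.List.min? ((if key x < key q then x else q) :: t) key := by
  by_cases h : key x < key q <;> simp [PySem.List.min?, h]

-- Invariants: once a tracker of A's fused fold holds some q with its bound equal to the matching
-- coordinate of q, that tracker computes exactly the min/max-with-key over q :: rest.
theorem foldA_maxx (l : List (Int × Int)) : ∀ (q : Int × Int) pb pc pd (my mnx mny : Int),
    (List.foldl stepA ((some q, pb, pc, pd), (q.1, my, mnx, mny)) l).1.1
    = PySem.List.max? (q :: l) (fun p => p.1) := by
  induction l with
  | nil => intro q pb pc pd my mnx mny; rfl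
  | cons x t ih =>
    intro q pb pc pd my mnx mny
    rw [max?_cons_cons]
    simp only [List.foldl_cons, stepA, gt_iff_lt]
    by_cases h : q.1 < x.1
    · simpa only [if_pos h] using ih x _ _ _ _ _ _
    · simpa only [if_neg h] using ih q _ _ _ _ _ _

theorem foldA_maxy (l : List (Int × Int)) : ∀ (q : Int × Int) pa pc pd (mx mnx mny : Int),
    (List.foldl stepA ((pa, some q, pc, pd), (mx, q.2, mnx, mny)) l).1.2.1
    = PySem.List.max? (q :: l) (fun p => p.2) := by
  induction l with
  | nil => intro q pa pc pd mx mnx mny; rfl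
  | cons x t ih =>
    intro q pa pc pd mx mnx mny
    rw [max?_cons_cons]
    simp only [List.foldl_cons, stepA, gt_iff_lt]
    by_cases h : q.2 < x.2
    · simpa only [if_pos h] using ih x _ _ _ _ _ _
    · simpa only [if_neg h] using ih q _ _ _ _ _ _

theorem foldA_minx (l : List (Int × Int)) : ∀ (q : Int × Int) pa pb pd (mx my mny : Int),
    (List.foldl stepA ((pa, pb, some q, pd), (mx, my, q.1, mny)) l).1.2.2.1
    = PySem.List.min? (q :: l) (fun p => p.1) := by
  induction l with
  | nil => intro q pa pb pd mx my mny; rfl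
  | cons x t ih =>
    intro q pa pb pd mx my mny
    rw [min?_cons_cons]
    simp only [List.foldl_cons, stepA, gt_iff_lt]
    by_cases h : x.1 < q.1
    · simpa only [if_pos h] using ih x _ _ _ _ _ _
    · simpa only [if_neg h] using ih q _ _ _ _ _ _

theorem foldA_miny (l : List (Int × Int)) : ∀ (q : Int × Int) pa pb pc (mx my mnx : Int),
    (List.foldl stepA ((pa, pb, pc, some q), (mx, my, mnx, q.2)) l).1.2.2.2
    = PySem.List.min? (q :: l) (fun p => p.2) := by
  induction l with
  | nil => intro q pa pb pc mx my mnx; rfl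
  | cons x t ih =>
    intro q pa pb pc mx my mnx
    rw [min?_cons_cons]
    simp only [List.foldl_cons, stepA, gt_iff_lt]
    by_cases h : x.2 < q.2
    · simpa only [if_pos h] using ih x _ _ _ _ _ _
    · simpa only [if_neg h] using ih q _ _ _ _ _ _

-- ===== VERDICT (by name: the statement is the Claim_ definition above) =====
theorem correct_sequence_spec : Claim_equal_correct_sequence := by
  intro p1 p2 p3 p4 hDom
  simp only [Dom_correct_sequence, pvDomInt, Bool.and_eq_true, decide_eq_true_eq] at hDom
  -- the first loop iteration always beats the ±10^10 sentinels on Dom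
  have h1 : stepA ((none, none, none, none), (-(10^10), -(10^10), 10^10, 10^10)) p1
      = ((some p1, some p1, some p1, some p1), (p1.1, p1.2, p1.1, p1.2)) := by
    simp only [stepA]
    split_ifs <;> first | rfl | (exfalso; omega)
  have h2 : List.foldl stepA ((none, none, none, none), (-(10^10), -(10^10), 10^10, 10^10)) [p1, p2, p3, p4]
      = List.foldl stepA ((some p1, some p1, some p1, some p1), (p1.1, p1.2, p1.1, p1.2)) [p2, p3, p4] := by
    rw [List.foldl_cons, h1]
  show _ = _
  unfold correct_sequence correct_sequence_alt
  simp only [pyGet?_zero_eq_head?, sorted_head_min, sorted_head_max,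
    h2, foldA_maxx, foldA_maxy, foldA_minx, foldA_miny]
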